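-- pv_equiv track=rewrite | github.com/hth810/pythonlc | 力扣题单/前缀和/※统计特殊四元组.py | countQuadruplets
-- ===== SOURCE A (Python) =====
-- from typing import List
--
-- from collections import defaultdict
--
-- def countQuadruplets(nums: List[int]) -> int:
--     cnt=defaultdict(int)
--     ans=0
--     n=len(nums)
--     for i in range(1,n-2):
--         for j in range(i):
--             cnt[nums[i]+nums[j]]+=1
--         for j in range(i+2,n):
--             ans+=cnt[nums[j]-nums[i+1]]
--     return ans
-- ===== SOURCE B (Python) =====
-- from typing import List
--
-- def countQuadruplets(nums: List[int]) -> int: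
--     n = len(nums)
--     total = 0
--     for a in range(n):
--         for b in range(a + 1, n):
--             for c in range(b + 1, n):
--                 for d in range(c + 1, n):
--                     if nums[a] + nums[b] + nums[c] == nums[d]:
--                         total += 1
--     return total
-- ===== Notes on version B (the rewrite author's own statement) =====
-- stated objective: simpler
-- what changed: Replaced A's incremental prefix pair-sum counter (a defaultdict updated while sweeping the split index) by the canonical brute-force enumeration of all index quadruples a<b<c<d with a direct test nums[a]+nums[b]+nums[c]==nums[d].
import Mathlib
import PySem

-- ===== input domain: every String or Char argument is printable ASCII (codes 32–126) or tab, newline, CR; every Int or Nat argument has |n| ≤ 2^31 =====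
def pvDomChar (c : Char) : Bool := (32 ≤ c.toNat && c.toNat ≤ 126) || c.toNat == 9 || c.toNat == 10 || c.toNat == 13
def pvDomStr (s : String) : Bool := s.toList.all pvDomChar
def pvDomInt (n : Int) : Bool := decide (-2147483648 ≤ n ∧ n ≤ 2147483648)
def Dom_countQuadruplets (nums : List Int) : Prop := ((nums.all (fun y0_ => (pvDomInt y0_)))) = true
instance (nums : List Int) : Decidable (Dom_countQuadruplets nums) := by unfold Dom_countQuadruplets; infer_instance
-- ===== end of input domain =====

-- B replaces A's incremental prefix pair-sum counter by the canonical brute-force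
-- enumeration of all index quadruples a<b<c<d (simpler reference implementation; not faster).

-- ===== PORT A =====
-- The defaultdict read cnt[...] also inserts a 0 value for a missing key; that insertion
-- never changes any later count or lookup value, so the read is ported as getD with
-- default 0 (exact for the returned value).
def countQuadruplets (nums : List Int) : Int :=
  let n : Int := PySem.List.len nums
  ((PySem.List.pyRange 1 (n-2) 1).foldl
    (fun (st : PySem.Dict Int Int × Int) i =>
      let cnt := (PySem.List.pyRange 0 i 1).foldl
        (fun d j => d.modify (PySem.List.pyGetD nums i 0 + PySem.List.pyGetD nums j 0) 0 (· + 1)) st.1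
      let ans := (PySem.List.pyRange (i+2) n 1).foldl
        (fun a j => a + cnt.getD (PySem.List.pyGetD nums j 0 - PySem.List.pyGetD nums (i+1) 0) 0) st.2
      (cnt, ans))
    (PySem.Dict.empty, 0)).2

-- ===== PORT B =====
def countQuadruplets_alt (nums : List Int) : Int :=
  let n : Int := PySem.List.len nums
  (PySem.List.pyRange 0 n 1).foldl (fun tot a =>
    (PySem.List.pyRange (a+1) n 1).foldl (fun tot b =>
      (PySem.List.pyRange (b+1) n 1).foldl (fun tot c =>
        (PySem.List.pyRange (c+1) n 1).foldl (fun tot d =>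
          if PySem.List.pyGetD nums a 0 + PySem.List.pyGetD nums b 0 + PySem.List.pyGetD nums c 0
             = PySem.List.pyGetD nums d 0 then tot + 1 else tot) tot) tot) tot) 0

-- ===== PRECONDITION & SPEC =====
def Spec_countQuadruplets (nums : List Int) (out : Int) : Prop := out = countQuadruplets_alt nums
instance (nums : List Int) (out : Int) : Decidable (Spec_countQuadruplets nums out) := by unfold Spec_countQuadruplets; infer_instance

-- ===== CLAIM (what is proved, stated in full; the proofs are below) =====
def Claim_equal_countQuadruplets : Prop := ∀ (nums : List Int), Dom_countQuadruplets nums → Spec_countQuadruplets nums (countQuadruplets nums)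

-- ===== LEMMAS AND PROOFS =====

-- Sum of f over a list (the shape every loop below reduces to).
def pvS (l : List Int) (f : Int → Int) : Int := (l.map f).sum

-- g-view of the list, the pair-sum pool counted by A's dict, and A's per-iteration answer.
def pvG (nums : List Int) : Int → Int := fun k => PySem.List.pyGetD nums k 0

def pvAPS (g : Int → Int) (m : Int) : List Int :=
  (PySem.List.pyRange 1 m 1).flatMap (fun b => (PySem.List.pyRange 0 b 1).map (fun a => g b + g a))

def pvInner (g : Int → Int) (n i : Int) : Int :=
  pvS (PySem.List.pyRange (i+2) n 1) (fun j => ((pvAPS g (i+1)).count (g j - g (i+1)) : Int))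

-- rectangularised indicator terms (A's in loop order c,j,b,a; B's in loop order a,b,c,d)
def pvE1 (g : Int → Int) (n c j b a : Int) : Int :=
  if 2 ≤ c ∧ c < n-1 then
    if c+1 ≤ j ∧ j < n then
      if 1 ≤ b ∧ b < c then
        if 0 ≤ a ∧ a < b then (if g b + g a = g j - g c then 1 else 0) else 0
      else 0
    else 0
  else 0

def pvE2 (g : Int → Int) (n a b c d : Int) : Int :=
  if a+1 ≤ b ∧ b < n then
    if b+1 ≤ c ∧ c < n then
      if c+1 ≤ d ∧ d < n then (if g a + g b + g c = g d then 1 else 0) else 0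
    else 0
  else 0

-- basic pvS lemmas
theorem pvS_congr {l : List Int} {f g : Int → Int} (h : ∀ x ∈ l, f x = g x) :
    pvS l f = pvS l g := congrArg List.sum (List.map_congr_left h)

theorem pvS_zero (l : List Int) : pvS l (fun _ => 0) = 0 := by
  simp [pvS]

theorem pvS_singleton (x : Int) (f : Int → Int) : pvS [x] f = f x := by
  simp [pvS]

theorem pvS_append (l r : List Int) (f : Int → Int) :
    pvS (l ++ r) f = pvS l f + pvS r f := by
  simp [pvS]

theorem pvS_swap (l r : List Int) (f : Int → Int → Int) :
    pvS l (fun x => pvS r (fun y => f x y)) = pvS r (fun y => pvS l (fun x => f x y)) := by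
  induction l with
  | nil => simp [pvS]
  | cons x xs ih =>
      simp only [pvS, List.map_cons, List.sum_cons] at *
      rw [ih, ← PySem.List.sum_map_add_int]

theorem pvS_shift (a b : Int) (f : Int → Int) :
    pvS (PySem.List.pyRange (a+1) (b+1) 1) f = pvS (PySem.List.pyRange a b 1) (fun x => f (x+1)) := by
  have h : b + 1 - (a + 1) = b - a := by ring
  simp only [pvS, PySem.List.pyRange_one, h, List.map_map]
  congr 1
  apply List.map_congr_left
  intro k _
  exact congrArg f (by ring)

theorem pvS_embed (f : Int → Int) (l u n : Int) (hl : 0 ≤ l) (hu : u ≤ n) :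
    pvS (PySem.List.pyRange l u 1) f
      = pvS (PySem.List.pyRange 0 n 1) (fun x => if l ≤ x ∧ x < u then f x else 0) := by
  rcases le_or_gt u l with h | h
  · rw [PySem.List.pyRange_one_eq_nil h]
    rw [show pvS [] f = 0 from rfl]
    rw [pvS_congr (g := fun _ => 0) (fun x _ => by rw [if_neg (by omega)]), pvS_zero]
  · have h1 : PySem.List.pyRange 0 n 1 = PySem.List.pyRange 0 l 1 ++ PySem.List.pyRange l n 1 :=
      PySem.List.pyRange_one_append 0 l n hl (by omega)
    have h2 : PySem.List.pyRange l n 1 = PySem.List.pyRange l u 1 ++ PySem.List.pyRange u n 1 :=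
      PySem.List.pyRange_one_append l u n (by omega) hu
    rw [h1, h2, pvS_append, pvS_append]
    have e1 : pvS (PySem.List.pyRange 0 l 1) (fun x => if l ≤ x ∧ x < u then f x else 0) = 0 := by
      rw [pvS_congr (g := fun _ => 0) (fun x hx => by
        rw [PySem.List.mem_pyRange_one] at hx; rw [if_neg (by omega)]), pvS_zero]
    have e3 : pvS (PySem.List.pyRange u n 1) (fun x => if l ≤ x ∧ x < u then f x else 0) = 0 := by
      rw [pvS_congr (g := fun _ => 0) (fun x hx => by
        rw [PySem.List.mem_pyRange_one] at hx; rw [if_neg (by omega)]), pvS_zero]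
    have e2 : pvS (PySem.List.pyRange l u 1) (fun x => if l ≤ x ∧ x < u then f x else 0)
        = pvS (PySem.List.pyRange l u 1) f := by
      apply pvS_congr; intro x hx
      rw [PySem.List.mem_pyRange_one] at hx; rw [if_pos (by omega)]
    rw [e1, e2, e3]; ring

-- A's loop: after the first t outer iterations the dict counts exactly the pool
-- pvAPS (1+t), and the accumulator is the sum of the per-iteration answers.
theorem pv_A_loop (g : Int → Int) (n : Int) (t : Nat) :
    (∀ v, (((PySem.List.pyRange 1 (1+(t:Int)) 1).foldl
      (fun (st : PySem.Dict Int Int × Int) i =>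
        let cnt := (PySem.List.pyRange 0 i 1).foldl
          (fun d j => d.modify (g i + g j) 0 (· + 1)) st.1
        let ans := (PySem.List.pyRange (i+2) n 1).foldl
          (fun a j => a + cnt.getD (g j - g (i+1)) 0) st.2
        (cnt, ans))
      (PySem.Dict.empty, 0)).1).getD v 0 = ((pvAPS g (1+(t:Int))).count v : Int)) ∧
    ((PySem.List.pyRange 1 (1+(t:Int)) 1).foldl
      (fun (st : PySem.Dict Int Int × Int) i =>
        let cnt := (PySem.List.pyRange 0 i 1).foldl
          (fun d j => d.modify (g i + g j) 0 (· + 1)) st.1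
        let ans := (PySem.List.pyRange (i+2) n 1).foldl
          (fun a j => a + cnt.getD (g j - g (i+1)) 0) st.2
        (cnt, ans))
      (PySem.Dict.empty, 0)).2
      = pvS (PySem.List.pyRange 1 (1+(t:Int)) 1) (pvInner g n) := by
  induction t with
  | zero =>
      constructor
      · intro v
        simp [PySem.List.pyRange_one_eq_nil (le_refl (1:Int)), pvAPS]
      · simp [PySem.List.pyRange_one_eq_nil (le_refl (1:Int)), pvS]
  | succ t ih =>
      obtain ⟨ih1, ih2⟩ := ih
      have hcast : (1 + ((t:Nat)+1:Nat) : Int) = (1 + (t:Int)) + 1 := by push_cast; ring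
      rw [hcast, PySem.List.pyRange_one_succ_right (by omega : (1:Int) ≤ 1 + (t:Int)),
        List.foldl_append]
      simp only [List.foldl_cons, List.foldl_nil]
      set st := (PySem.List.pyRange 1 (1+(t:Int)) 1).foldl
        (fun (st : PySem.Dict Int Int × Int) i =>
          let cnt := (PySem.List.pyRange 0 i 1).foldl
            (fun d j => d.modify (g i + g j) 0 (· + 1)) st.1
          let ans := (PySem.List.pyRange (i+2) n 1).foldl
            (fun a j => a + cnt.getD (g j - g (i+1)) 0) st.2
          (cnt, ans))
        (PySem.Dict.empty, 0) with hst
      have hAPS : pvAPS g ((1+(t:Int))+1)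
          = pvAPS g (1+(t:Int)) ++ (PySem.List.pyRange 0 (1+(t:Int)) 1).map (fun a => g (1+(t:Int)) + g a) := by
        unfold pvAPS
        rw [PySem.List.pyRange_one_succ_right (by omega : (1:Int) ≤ 1 + (t:Int)),
          List.flatMap_append]
        simp
      have hcnt : ∀ v, (((PySem.List.pyRange 0 (1+(t:Int)) 1).foldl
          (fun d j => d.modify (g (1+(t:Int)) + g j) 0 (· + 1)) st.1).getD v 0)
          = ((pvAPS g ((1+(t:Int))+1)).count v : Int) := by
        intro v
        rw [show ((PySem.List.pyRange 0 (1+(t:Int)) 1).foldl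
            (fun d j => d.modify (g (1+(t:Int)) + g j) 0 (· + 1)) st.1)
          = (((PySem.List.pyRange 0 (1+(t:Int)) 1).map (fun j => g (1+(t:Int)) + g j)).foldl
            (fun d x => d.modify x 0 (· + 1)) st.1) from (List.foldl_map (f := fun j => g (1+(t:Int)) + g j)
            (g := fun d x => PySem.Dict.modify d x 0 (· + 1))).symm]
        rw [PySem.Dict.getD_foldl_modify_add_one, ih1 v, hAPS, List.count_append]
        push_cast
        ring
      constructor
      · intro v
        exact hcnt v
      · rw [PySem.List.foldl_add]
        rw [ih2, pvS_append, pvS_singleton]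
        congr 1
        unfold pvInner pvS
        congr 1
        apply List.map_congr_left
        intro j _
        exact hcnt (g j - g ((1+(t:Int))+1))

theorem pv_A_char (nums : List Int) :
    countQuadruplets nums
      = pvS (PySem.List.pyRange 1 (PySem.List.len nums - 2) 1)
          (pvInner (pvG nums) (PySem.List.len nums)) := by
  by_cases h : PySem.List.len nums - 2 ≤ 1
  · simp only [countQuadruplets]
    rw [PySem.List.pyRange_one_eq_nil h]
    simp [pvS]
  · simp only [countQuadruplets]
    rw [show PySem.List.len nums - 2 = 1 + ((PySem.List.len nums - 3).toNat : Int) from by omega]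
    exact (pv_A_loop (pvG nums) (PySem.List.len nums) (PySem.List.len nums - 3).toNat).2

-- the pool count as a nested indicator sum
theorem pv_inner_eq (g : Int → Int) (n i : Int) :
    pvInner g n i
      = pvS (PySem.List.pyRange (i+2) n 1) (fun j =>
          pvS (PySem.List.pyRange 1 (i+1) 1) (fun b =>
            pvS (PySem.List.pyRange 0 b 1) (fun a =>
              if g b + g a = g j - g (i+1) then 1 else 0))) := by
  simp only [pvInner, pvAPS, pvS, List.count_flatMap, Function.comp_def]
  simp only [Nat.cast_list_sum, List.map_map, Function.comp_def, List.count_eq_countP,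
    ← PySem.List.sum_map_ite_one_zero, beq_iff_eq]

theorem pv_A_rect (g : Int → Int) (n : Int) :
    pvS (PySem.List.pyRange 1 (n-2) 1) (fun i =>
      pvS (PySem.List.pyRange (i+2) n 1) (fun j =>
        pvS (PySem.List.pyRange 1 (i+1) 1) (fun b =>
          pvS (PySem.List.pyRange 0 b 1) (fun a =>
            if g b + g a = g j - g (i+1) then 1 else 0))))
      = pvS (PySem.List.pyRange 0 n 1) (fun c =>
          pvS (PySem.List.pyRange 0 n 1) (fun j =>
            pvS (PySem.List.pyRange 0 n 1) (fun b =>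
              pvS (PySem.List.pyRange 0 n 1) (fun a => pvE1 g n c j b a)))) := by
  have hbody : ∀ i : Int,
      pvS (PySem.List.pyRange (i+1+1) n 1) (fun j =>
        pvS (PySem.List.pyRange 1 (i+1) 1) (fun b =>
          pvS (PySem.List.pyRange 0 b 1) (fun a =>
            if g b + g a = g j - g (i+1) then 1 else 0)))
      = pvS (PySem.List.pyRange (i+2) n 1) (fun j =>
          pvS (PySem.List.pyRange 1 (i+1) 1) (fun b =>
            pvS (PySem.List.pyRange 0 b 1) (fun a =>
              if g b + g a = g j - g (i+1) then 1 else 0))) := by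
    intro i
    have h2 : i + 1 + 1 = i + 2 := by ring
    rw [h2]
  calc
    pvS (PySem.List.pyRange 1 (n-2) 1) (fun i =>
      pvS (PySem.List.pyRange (i+2) n 1) (fun j =>
        pvS (PySem.List.pyRange 1 (i+1) 1) (fun b =>
          pvS (PySem.List.pyRange 0 b 1) (fun a =>
            if g b + g a = g j - g (i+1) then 1 else 0))))
        = pvS (PySem.List.pyRange (1+1) ((n-2)+1) 1) (fun c =>
            pvS (PySem.List.pyRange (c+1) n 1) (fun j =>
              pvS (PySem.List.pyRange 1 c 1) (fun b =>
                pvS (PySem.List.pyRange 0 b 1) (fun a =>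
                  if g b + g a = g j - g c then 1 else 0)))) := by
          rw [pvS_shift]
          exact (pvS_congr (fun i _ => hbody i)).symm
    _ = pvS (PySem.List.pyRange 0 n 1) (fun c =>
          if 2 ≤ c ∧ c < n-1 then
            pvS (PySem.List.pyRange (c+1) n 1) (fun j =>
              pvS (PySem.List.pyRange 1 c 1) (fun b =>
                pvS (PySem.List.pyRange 0 b 1) (fun a =>
                  if g b + g a = g j - g c then 1 else 0)))
          else 0) := by
          rw [show ((n:Int)-2)+1 = n-1 by ring]
          exact pvS_embed _ 2 (n-1) n (by omega) (by omega)
    _ = pvS (PySem.List.pyRange 0 n 1) (fun c =>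
          pvS (PySem.List.pyRange 0 n 1) (fun j =>
            pvS (PySem.List.pyRange 0 n 1) (fun b =>
              pvS (PySem.List.pyRange 0 n 1) (fun a => pvE1 g n c j b a)))) := by
          apply pvS_congr; intro c hc
          rw [PySem.List.mem_pyRange_one] at hc
          by_cases hP : 2 ≤ c ∧ c < n-1
          · rw [if_pos hP]
            simp only [pvE1, if_pos hP]
            rw [pvS_embed _ (c+1) n n (by omega) le_rfl]
            apply pvS_congr; intro j hj
            rw [PySem.List.mem_pyRange_one] at hj
            by_cases hQ : c+1 ≤ j ∧ j < n
            · rw [if_pos hQ]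
              simp only [if_pos hQ]
              rw [pvS_embed _ 1 c n (by omega) (by omega)]
              apply pvS_congr; intro b hb
              rw [PySem.List.mem_pyRange_one] at hb
              by_cases hR : 1 ≤ b ∧ b < c
              · rw [if_pos hR]
                simp only [if_pos hR]
                exact pvS_embed _ 0 b n (by omega) (by omega)
              · rw [if_neg hR]
                simp only [if_neg hR]
                exact (pvS_zero _).symm
            · rw [if_neg hQ]
              simp only [if_neg hQ]
              rw [pvS_congr (g := fun _ => 0) (fun b _ => pvS_zero _), pvS_zero]
          · rw [if_neg hP]
            simp only [pvE1, if_neg hP]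
            rw [pvS_congr (g := fun _ => 0) (fun j _ => by
              rw [pvS_congr (g := fun _ => 0) (fun b _ => pvS_zero _), pvS_zero]), pvS_zero]

theorem pv_B_char (nums : List Int) :
    countQuadruplets_alt nums
      = pvS (PySem.List.pyRange 0 (PySem.List.len nums) 1) (fun a =>
          pvS (PySem.List.pyRange (a+1) (PySem.List.len nums) 1) (fun b =>
            pvS (PySem.List.pyRange (b+1) (PySem.List.len nums) 1) (fun c =>
              pvS (PySem.List.pyRange (c+1) (PySem.List.len nums) 1) (fun d =>
                if pvG nums a + pvG nums b + pvG nums c = pvG nums d then 1 else 0)))) := by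
  simp only [countQuadruplets_alt, pvS, pvG, PySem.List.foldl_ite_add_one,
    PySem.List.foldl_add, zero_add, ← PySem.List.sum_map_ite_one_zero, decide_eq_true_eq]
  rfl

theorem pv_B_rect (g : Int → Int) (n : Int) :
    pvS (PySem.List.pyRange 0 n 1) (fun a =>
      pvS (PySem.List.pyRange (a+1) n 1) (fun b =>
        pvS (PySem.List.pyRange (b+1) n 1) (fun c =>
          pvS (PySem.List.pyRange (c+1) n 1) (fun d =>
            if g a + g b + g c = g d then 1 else 0))))
      = pvS (PySem.List.pyRange 0 n 1) (fun a =>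
          pvS (PySem.List.pyRange 0 n 1) (fun b =>
            pvS (PySem.List.pyRange 0 n 1) (fun c =>
              pvS (PySem.List.pyRange 0 n 1) (fun d => pvE2 g n a b c d)))) := by
  apply pvS_congr; intro a ha
  rw [PySem.List.mem_pyRange_one] at ha
  rw [pvS_embed _ (a+1) n n (by omega) le_rfl]
  apply pvS_congr; intro b hb
  rw [PySem.List.mem_pyRange_one] at hb
  by_cases hP : a+1 ≤ b ∧ b < n
  · rw [if_pos hP]
    simp only [pvE2, if_pos hP]
    rw [pvS_embed _ (b+1) n n (by omega) le_rfl]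
    apply pvS_congr; intro c hc
    rw [PySem.List.mem_pyRange_one] at hc
    by_cases hQ : b+1 ≤ c ∧ c < n
    · rw [if_pos hQ]
      simp only [if_pos hQ]
      exact pvS_embed _ (c+1) n n (by omega) le_rfl
    · rw [if_neg hQ]
      simp only [if_neg hQ]
      exact (pvS_zero _).symm
  · rw [if_neg hP]
    simp only [pvE2, if_neg hP]
    rw [pvS_congr (g := fun _ => 0) (fun c _ => pvS_zero _), pvS_zero]

theorem pvS_comm4 (R : List Int) (G : Int → Int → Int → Int → Int) :
    pvS R (fun c => pvS R (fun j => pvS R (fun b => pvS R (fun a => G c j b a))))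
      = pvS R (fun a => pvS R (fun b => pvS R (fun c => pvS R (fun j => G c j b a)))) := by
  calc
    pvS R (fun c => pvS R (fun j => pvS R (fun b => pvS R (fun a => G c j b a))))
        = pvS R (fun c => pvS R (fun b => pvS R (fun j => pvS R (fun a => G c j b a)))) :=
          pvS_congr (fun c _ => pvS_swap R R _)
    _ = pvS R (fun c => pvS R (fun b => pvS R (fun a => pvS R (fun j => G c j b a)))) :=
          pvS_congr (fun c _ => pvS_congr (fun b _ => pvS_swap R R _))
    _ = pvS R (fun c => pvS R (fun a => pvS R (fun b => pvS R (fun j => G c j b a)))) :=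
          pvS_congr (fun c _ => pvS_swap R R _)
    _ = pvS R (fun a => pvS R (fun c => pvS R (fun b => pvS R (fun j => G c j b a)))) :=
          pvS_swap R R _
    _ = pvS R (fun a => pvS R (fun b => pvS R (fun c => pvS R (fun j => G c j b a)))) :=
          pvS_congr (fun a _ => pvS_swap R R _)

theorem pv_rect_eq (g : Int → Int) (n : Int) :
    pvS (PySem.List.pyRange 0 n 1) (fun c =>
      pvS (PySem.List.pyRange 0 n 1) (fun j =>
        pvS (PySem.List.pyRange 0 n 1) (fun b =>
          pvS (PySem.List.pyRange 0 n 1) (fun a => pvE1 g n c j b a))))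
      = pvS (PySem.List.pyRange 0 n 1) (fun a =>
          pvS (PySem.List.pyRange 0 n 1) (fun b =>
            pvS (PySem.List.pyRange 0 n 1) (fun c =>
              pvS (PySem.List.pyRange 0 n 1) (fun d => pvE2 g n a b c d)))) := by
  rw [pvS_comm4]
  apply pvS_congr; intro a ha
  apply pvS_congr; intro b _
  apply pvS_congr; intro c _
  apply pvS_congr; intro d _
  rw [PySem.List.mem_pyRange_one] at ha
  unfold pvE1 pvE2
  split_ifs <;> first | rfl | (exfalso; omega)

-- ===== VERDICT (by name: the statement is the Claim_ definition above) =====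
theorem countQuadruplets_spec : Claim_equal_countQuadruplets := by
  intro nums _
  unfold Spec_countQuadruplets
  rw [pv_A_char, pv_B_char, pv_B_rect, ← pv_rect_eq, ← pv_A_rect]
  exact pvS_congr (fun i _ => pv_inner_eq (pvG nums) (PySem.List.len nums) i)
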